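-- pv_equiv track=rewrite | github.com/noobmannn/Algorithm-in-Information-Security | BaiTapATTT/PhanCoBan/Cau25.py | solve
-- ===== SOURCE A (Python) =====
-- def sieveOfEratosthenes(n):
--     listPrime = []
--     check = [True for _ in range(n + 1)]
--     p = 2
--     while p * p <= n:
--         if check[p]:
--             for i in range(p * p, n + 1, p):
--                 check[i] = False
--         p += 1
--     for p in range(2, n + 1):
--         if check[p]:
--             listPrime.append(p)
--     return listPrime
--
-- def solve(n):
--     listRes = []
--     listPr = sieveOfEratosthenes(n)
--     for i in listPr:
--         for j in listPr:
--             for k in listPr: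
--                 if i + j + k == n and i < j < k:
--                     listTmp = [i, j, k]
--                     listRes.append(listTmp)
--     return listRes
-- ===== SOURCE B (Python) =====
-- def sieveOfEratosthenes(n):  # same sieve helper the module already has
--     listPrime = []
--     check = [True for _ in range(n + 1)]
--     p = 2
--     while p * p <= n:
--         if check[p]:
--             for i in range(p * p, n + 1, p):
--                 check[i] = False
--         p += 1
--     for p in range(2, n + 1):
--         if check[p]:
--             listPrime.append(p)
--     return listPrime
--
-- def solve(n):
--     primes = sieveOfEratosthenes(n)
--     primeSet = set(primes)
--     res = []
--     for a, i in enumerate(primes):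
--         for j in primes[a + 1:]:
--             k = n - i - j
--             if j < k and k in primeSet:
--                 res.append([i, j, k])
--     return res
-- ===== Notes on version B (the rewrite author's own statement) =====
-- stated objective: faster
-- what changed: Replaced the triple nested loop over all primes with a loop over pairs i<j (j drawn only from primes after i) that computes k=n-i-j directly and tests its primality by set membership.
import Mathlib
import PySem

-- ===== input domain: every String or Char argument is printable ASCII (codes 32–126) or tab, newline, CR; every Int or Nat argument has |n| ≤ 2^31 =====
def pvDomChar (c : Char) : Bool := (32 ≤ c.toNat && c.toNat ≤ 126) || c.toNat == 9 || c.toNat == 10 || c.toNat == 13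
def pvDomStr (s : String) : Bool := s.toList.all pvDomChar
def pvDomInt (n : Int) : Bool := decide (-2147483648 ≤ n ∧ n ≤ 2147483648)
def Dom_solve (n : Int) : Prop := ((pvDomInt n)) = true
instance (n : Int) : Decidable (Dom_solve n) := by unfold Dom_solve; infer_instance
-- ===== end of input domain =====

-- B replaces A's triple loop over the primes with a pair loop i<j testing k=n-i-j by set membership (asymptotically faster; B reuses the module's sieve helper).

-- ===== PORT A =====
-- the 'while p * p <= n' marking loop of sieveOfEratosthenes; fuel is a structural bound
-- on the number of iterations (the loop runs while p*p <= n, so at most (n+1).toNat steps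
-- from p = 2) — it only makes the recursion total, it never cuts the loop short
def sieveLoop (n : Int) (fuel : Nat) (check : List Bool) (p : Int) : List Bool :=
  match fuel with
  | 0 => check
  | Nat.succ fuel =>
    if p * p ≤ n then
      sieveLoop n fuel
        (if PySem.List.pyGetD check p false then
          (PySem.List.pyRange (p * p) (n + 1) p).foldl
            (fun c i => PySem.List.pySetD c i false) check
         else check)
        (p + 1)
    else check

def sieveOfEratosthenes (n : Int) : List Int :=
  let check := sieveLoop n (n + 1).toNat (List.replicate (n + 1).toNat true) 2
  (PySem.List.pyRange 2 (n + 1) 1).foldl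
    (fun acc p => if PySem.List.pyGetD check p false then acc ++ [p] else acc) []

def solve (n : Int) : List (List Int) :=
  let listPr := sieveOfEratosthenes n
  listPr.foldl (fun res i =>
    listPr.foldl (fun res j =>
      listPr.foldl (fun res k =>
        if i + j + k = n ∧ i < j ∧ j < k then res ++ [[i, j, k]] else res)
        res)
      res)
    []

-- ===== PORT B =====
def solve_alt (n : Int) : List (List Int) :=
  let primes := sieveOfEratosthenes n
  let primeSet : PySem.Set Int := PySem.Set.ofList primes
  (PySem.List.enumerate primes 0).foldl (fun res ai =>
    (PySem.List.slice primes (some (ai.1 + 1)) none).foldl (fun res j =>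
      let k := n - ai.2 - j
      if j < k ∧ PySem.Set.contains primeSet k = true then res ++ [[ai.2, j, k]] else res)
      res)
    []

-- ===== PRECONDITION & SPEC =====
def Spec_solve (n : Int) (out : List (List Int)) : Prop := out = solve_alt n
instance (n : Int) (out : List (List Int)) : Decidable (Spec_solve n out) := by unfold Spec_solve; infer_instance

-- ===== CLAIM (what is proved, stated in full; the proofs are below) =====
def Claim_equal_solve : Prop := ∀ (n : Int), Dom_solve n → Spec_solve n (solve n)

-- ===== LEMMAS AND PROOFS =====

-- 'if p(x): out.append(f(x))' fold with a Prop test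
theorem foldl_ite_app {α β : Type} (p : α → Prop) [DecidablePred p] (f : α → β)
    (l : List α) (acc : List β) :
    l.foldl (fun acc x => if p x then acc ++ [f x] else acc) acc
      = acc ++ (l.filter (fun x => decide (p x))).map f := by
  induction l generalizing acc with
  | nil => simp
  | cons x xs ih =>
    by_cases h : p x <;> simp [List.foldl_cons, ih, h]

-- 'out += g(x)' fold
theorem foldl_app {α β : Type} (g : α → List β) (l : List α) (acc : List β) :
    l.foldl (fun acc x => acc ++ g x) acc = acc ++ l.flatMap g := by
  induction l generalizing acc with
  | nil => simp
  | cons x xs ih => simp [List.foldl_cons, ih]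

-- flatMap of an at-most-one-element function is filter-then-map
theorem flatMap_ite_singleton {α β : Type} (p : α → Prop) [DecidablePred p] (f : α → β)
    (l : List α) :
    l.flatMap (fun x => if p x then [f x] else []) = (l.filter (fun x => decide (p x))).map f := by
  induction l with
  | nil => simp
  | cons x xs ih => by_cases h : p x <;> simp [h, ih]

-- in a Nodup list, filtering by equality to c (plus a predicate on c) keeps at most one cell
theorem filter_eq_singleton {α : Type} [DecidableEq α] (L : List α) (hnd : L.Nodup)
    (c : α) (q : Prop) [Decidable q] :
    L.filter (fun k => decide (k = c ∧ q)) = if c ∈ L ∧ q then [c] else [] := by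
  by_cases hq : q
  · simp only [hq, and_true]
    induction L with
    | nil => simp
    | cons x xs ih =>
      have hnotmem : x ∉ xs := (List.nodup_cons.mp hnd).1
      have hnd' : xs.Nodup := (List.nodup_cons.mp hnd).2
      by_cases hx : x = c
      · subst hx
        have hnil : xs.filter (fun k => decide (k = x)) = [] :=
          List.filter_eq_nil_iff.mpr (fun a ha h => hnotmem (by
            have : a = x := of_decide_eq_true h
            simpa [this] using ha))
        simp [hnil]
      · rw [List.filter_cons_of_neg (by simpa using hx), ih hnd']
        have hcx : ¬ c = x := fun h => hx h.symm
        simp [List.mem_cons, hcx]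
  · simp [hq]

-- in a strictly increasing list, the elements greater than L[a] are exactly the tail after a
theorem filter_gt_eq_drop (L : List Int) (hs : L.Pairwise (· < ·)) :
    ∀ (a : Nat) (h : a < L.length),
      L.filter (fun j => decide (L[a] < j)) = L.drop (a + 1) := by
  induction L with
  | nil => intro a h; simp at h
  | cons x xs ih =>
    intro a h
    have hhead : ∀ y ∈ xs, x < y := fun y hy => (List.pairwise_cons.mp hs).1 y hy
    have hs' : xs.Pairwise (· < ·) := (List.pairwise_cons.mp hs).2
    match a with
    | 0 =>
      simp only [List.getElem_cons_zero]
      rw [List.filter_cons_of_neg (by simp)]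
      simpa using List.filter_eq_self.mpr (fun y hy => decide_eq_true (hhead y hy))
    | Nat.succ a =>
      have ha : a < xs.length := by simpa using h
      have hxa : x < xs[a] := hhead _ (List.getElem_mem ha)
      have hnot : ¬ (xs[a] < x) := not_lt.mpr (le_of_lt hxa)
      simp only [List.getElem_cons_succ]
      rw [List.filter_cons_of_neg (by simpa using hnot), List.drop_succ_cons]
      exact ih hs' a ha

-- the sieve's prime list is strictly increasing
theorem sieve_pairwise (n : Int) : (sieveOfEratosthenes n).Pairwise (· < ·) := by
  unfold sieveOfEratosthenes
  rw [PySem.List.foldl_append_if_eq_filter]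
  exact List.Pairwise.filter _ (PySem.List.pairwise_lt_pyRange_one 2 (n + 1))

-- per-element core: for i = L[a] in a strictly increasing L, A's two inner loops
-- produce exactly B's single filtered pass over the tail after a
theorem inner_eq (n : Int) (L : List Int) (hs : L.Pairwise (· < ·))
    (a : Nat) (h : a < L.length) :
    L.flatMap (fun j => (L.filter (fun k => decide (L[a] + j + k = n ∧ L[a] < j ∧ j < k))).map
        (fun k => [L[a], j, k]))
      = ((L.drop (a + 1)).filter (fun j => decide (j < n - L[a] - j ∧ (n - L[a] - j) ∈ L))).map
        (fun j => [L[a], j, n - L[a] - j]) := by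
  have hnd : L.Nodup := hs.nodup
  set i := L[a] with hi
  have step1 : ∀ j : Int,
      (L.filter (fun k => decide (i + j + k = n ∧ i < j ∧ j < k))).map (fun k => [i, j, k])
        = if i < j ∧ (j < n - i - j ∧ (n - i - j) ∈ L) then [[i, j, n - i - j]] else [] := by
    intro j
    have hcongr : L.filter (fun k => decide (i + j + k = n ∧ i < j ∧ j < k))
        = L.filter (fun k => decide (k = n - i - j ∧ (i < j ∧ j < k))) := by
      apply List.filter_congr
      intro k _
      simp only [decide_eq_decide]
      constructor
      · rintro ⟨h1, h2, h3⟩; exact ⟨by omega, h2, h3⟩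
      · rintro ⟨h1, h2, h3⟩; exact ⟨by omega, h2, h3⟩
    rw [hcongr]
    -- the inner condition depends on k only through k = n-i-j; rewrite it to a fixed Prop
    have hcongr2 : L.filter (fun k => decide (k = n - i - j ∧ (i < j ∧ j < k)))
        = L.filter (fun k => decide (k = n - i - j ∧ (i < j ∧ j < n - i - j))) := by
      apply List.filter_congr
      intro k _
      simp only [decide_eq_decide]
      constructor
      · rintro ⟨rfl, h2, h3⟩; exact ⟨rfl, h2, h3⟩
      · rintro ⟨rfl, h2, h3⟩; exact ⟨rfl, h2, h3⟩
    rw [hcongr2, filter_eq_singleton L hnd (n - i - j) (i < j ∧ j < n - i - j)]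
    by_cases h1 : (n - i - j) ∈ L <;> by_cases h2 : i < j <;> by_cases h3 : j < n - i - j <;>
      simp [h1, h2, h3]
  calc L.flatMap (fun j => (L.filter (fun k => decide (i + j + k = n ∧ i < j ∧ j < k))).map
        (fun k => [i, j, k]))
      = L.flatMap (fun j => if i < j ∧ (j < n - i - j ∧ (n - i - j) ∈ L)
          then [[i, j, n - i - j]] else []) := by
        exact List.flatMap_congr (fun j _ => step1 j)
    _ = (L.filter (fun j => decide (i < j ∧ (j < n - i - j ∧ (n - i - j) ∈ L)))).map
          (fun j => [i, j, n - i - j]) := flatMap_ite_singleton _ _ L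
    _ = ((L.filter (fun j => decide (i < j))).filter
          (fun j => decide (j < n - i - j ∧ (n - i - j) ∈ L))).map
          (fun j => [i, j, n - i - j]) := by
        rw [List.filter_filter]
        congr 1
        apply List.filter_congr
        intro j _
        simp only [Bool.decide_and]
        exact Bool.and_comm _ _
    _ = ((L.drop (a + 1)).filter (fun j => decide (j < n - i - j ∧ (n - i - j) ∈ L))).map
          (fun j => [i, j, n - i - j]) := by
        rw [hi, filter_gt_eq_drop L hs a h]


-- index-wise bridge between a plain flatMap and a flatMap over enumerate
theorem flatMap_enum_aux {α β : Type} (L : List α) (s : Int)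
    (G : Int × α → List β) (F : α → List β)
    (h : ∀ (a : Nat) (ha : a < L.length), F L[a] = G (s + (a : Int), L[a])) :
    L.flatMap F = (PySem.List.enumerate L s).flatMap G := by
  induction L generalizing s with
  | nil => simp [PySem.List.enumerate_nil]
  | cons x xs ih =>
    rw [PySem.List.enumerate_cons]
    simp only [List.flatMap_cons]
    have h0 : F x = G (s, x) := by
      have := h 0 (by simp)
      simpa using this
    rw [h0, ih (s + 1)]
    intro a ha
    have hh := h (a + 1) (by simpa using Nat.succ_lt_succ ha)
    simp only [List.getElem_cons_succ] at hh
    have harg : s + ((a : Int) + 1) = s + 1 + (a : Int) := by ring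
    push_cast at hh
    rw [harg] at hh
    exact hh
  
theorem flatMap_enum {α β : Type} (L : List α)
    (G : Int × α → List β) (F : α → List β)
    (h : ∀ (a : Nat) (ha : a < L.length), F L[a] = G ((a : Int), L[a])) :
    L.flatMap F = (PySem.List.enumerate L 0).flatMap G := by
  apply flatMap_enum_aux
  intro a ha
  simpa using h a ha

-- ===== VERDICT (by name: the statement is the Claim_ definition above) =====
theorem solve_spec : Claim_equal_solve := by
  intro n _
  unfold Spec_solve solve solve_alt
  set L := sieveOfEratosthenes n with hL
  have hs : L.Pairwise (· < ·) := sieve_pairwise n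
  set S : PySem.Set Int := PySem.Set.ofList L with hS
  -- A's fold as a flatMap
  have hA : L.foldl (fun res i =>
      L.foldl (fun res j =>
        L.foldl (fun res k =>
          if i + j + k = n ∧ i < j ∧ j < k then res ++ [[i, j, k]] else res) res) res) []
      = L.flatMap (fun i => L.flatMap (fun j =>
          (L.filter (fun k => decide (i + j + k = n ∧ i < j ∧ j < k))).map
            (fun k => [i, j, k]))) := by
    have h2 : ∀ (i : Int) (res : List (List Int)),
        L.foldl (fun res j =>
          L.foldl (fun res k =>
            if i + j + k = n ∧ i < j ∧ j < k then res ++ [[i, j, k]] else res) res) res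
        = res ++ L.flatMap (fun j =>
            (L.filter (fun k => decide (i + j + k = n ∧ i < j ∧ j < k))).map
              (fun k => [i, j, k])) := by
      intro i res
      rw [List.foldl_ext _ _ res (fun res' j _ =>
        foldl_ite_app (fun k => i + j + k = n ∧ i < j ∧ j < k) (fun k => [i, j, k]) L res')]
      exact foldl_app _ L res
    rw [List.foldl_ext _ _ [] (fun res i _ => h2 i res)]
    simpa using foldl_app (fun i => L.flatMap (fun j =>
      (L.filter (fun k => decide (i + j + k = n ∧ i < j ∧ j < k))).map
        (fun k => [i, j, k]))) L []
  -- B's fold as a flatMap over enumerate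
  have hB : (PySem.List.enumerate L 0).foldl (fun res ai =>
      (PySem.List.slice L (some (ai.1 + 1)) none).foldl (fun res j =>
        let k := n - ai.2 - j
        if j < k ∧ PySem.Set.contains S k = true then res ++ [[ai.2, j, k]] else res) res) []
      = (PySem.List.enumerate L 0).flatMap (fun ai =>
          ((PySem.List.slice L (some (ai.1 + 1)) none).filter
            (fun j => decide (j < n - ai.2 - j ∧ PySem.Set.contains S (n - ai.2 - j) = true))).map
            (fun j => [ai.2, j, n - ai.2 - j])) := by
    have h2 : ∀ (ai : Int × Int) (res : List (List Int)),
        (PySem.List.slice L (some (ai.1 + 1)) none).foldl (fun res j =>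
          let k := n - ai.2 - j
          if j < k ∧ PySem.Set.contains S k = true then res ++ [[ai.2, j, k]] else res) res
        = res ++ ((PySem.List.slice L (some (ai.1 + 1)) none).filter
            (fun j => decide (j < n - ai.2 - j ∧ PySem.Set.contains S (n - ai.2 - j) = true))).map
            (fun j => [ai.2, j, n - ai.2 - j]) := fun ai res =>
      foldl_ite_app (fun j => j < n - ai.2 - j ∧ PySem.Set.contains S (n - ai.2 - j) = true)
        (fun j => [ai.2, j, n - ai.2 - j]) _ res
    rw [List.foldl_ext _ _ [] (fun res ai _ => h2 ai res)]
    simpa using foldl_app (fun ai : Int × Int =>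
      ((PySem.List.slice L (some (ai.1 + 1)) none).filter
        (fun j => decide (j < n - ai.2 - j ∧ PySem.Set.contains S (n - ai.2 - j) = true))).map
        (fun j => [ai.2, j, n - ai.2 - j])) (PySem.List.enumerate L 0) []
  rw [hA, hB]
  apply flatMap_enum
  intro a ha
  -- the slice after a+1 is the drop
  have hslice : PySem.List.slice L (some ((a : Int) + 1)) none = L.drop (a + 1) := by
    have hnat : ((a : Int) + 1).toNat = a + 1 := by omega
    rw [PySem.List.slice_from L (show (0 : Int) ≤ (a : Int) + 1 by positivity), hnat]
  have hmemcongr : ∀ (i : Int) (M : List Int),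
      M.filter (fun j => decide (j < n - i - j ∧ PySem.Set.contains S (n - i - j) = true))
      = M.filter (fun j => decide (j < n - i - j ∧ (n - i - j) ∈ L)) := by
    intro i M
    apply List.filter_congr
    intro j _
    simp only [decide_eq_decide]
    constructor
    · rintro ⟨h1, h2⟩
      exact ⟨h1, (PySem.Set.mem_ofList L _).mp ((PySem.Set.contains_iff S _).mp h2)⟩
    · rintro ⟨h1, h2⟩
      exact ⟨h1, (PySem.Set.contains_iff S _).mpr ((PySem.Set.mem_ofList L _).mpr h2)⟩
  simp only [hslice, hmemcongr]
  exact inner_eq n L hs a ha
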